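-- pv_equiv track=rewrite | github.com/hsnasforum/projectH | app/main.py | parse_selected_paths
-- ===== SOURCE A (Python) =====
-- def parse_selected_paths(raw_values: list[str] | None) -> list[str] | None:
--     if not raw_values:
--         return None
--
--     selected_paths: list[str] = []
--     for raw_value in raw_values:
--         if not raw_value.strip():
--             continue
--         for part in raw_value.split(","):
--             value = part.strip()
--             if value:
--                 selected_paths.append(value)
--     return selected_paths or None
-- ===== SOURCE B (Python) =====
-- def parse_selected_paths(raw_values):
--     if not raw_values:
--         return None
--     out = []
--     for raw in raw_values:
--         tok = []   # current token, leading whitespace never enters it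
--         pend = []  # whitespace seen after a token character, kept only if more token follows
--         for ch in raw:
--             if ch == ',':
--                 if tok:
--                     out.append(''.join(tok))
--                 tok = []
--                 pend = []
--             elif ch.isspace():
--                 if tok:
--                     pend.append(ch)
--             else:
--                 tok.extend(pend)
--                 pend = []
--                 tok.append(ch)
--         if tok:
--             out.append(''.join(tok))
--     return out or None
-- ===== Notes on version B (the rewrite author's own statement) =====
-- stated objective: alternative
-- what changed: B replaces A's split-on-comma plus per-part strip with a single character-level state machine: one pass over each string maintaining a token buffer and a pending-whitespace buffer, emitting tokens at commas and end of string.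
import Mathlib
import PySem

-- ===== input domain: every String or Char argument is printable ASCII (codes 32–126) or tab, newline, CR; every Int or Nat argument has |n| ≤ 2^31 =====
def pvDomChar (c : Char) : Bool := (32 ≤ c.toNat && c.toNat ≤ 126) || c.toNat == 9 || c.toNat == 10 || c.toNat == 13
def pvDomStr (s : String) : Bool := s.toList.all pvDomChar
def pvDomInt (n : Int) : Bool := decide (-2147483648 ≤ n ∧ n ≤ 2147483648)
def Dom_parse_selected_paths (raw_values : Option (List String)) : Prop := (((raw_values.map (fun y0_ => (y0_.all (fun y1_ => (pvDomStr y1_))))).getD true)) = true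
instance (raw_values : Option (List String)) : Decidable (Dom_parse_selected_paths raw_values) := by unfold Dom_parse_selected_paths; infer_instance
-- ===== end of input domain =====

-- B replaces A's split-on-comma + per-part strip with a single character-level state
-- machine (token buffer + pending-whitespace buffer), a genuinely different algorithm
-- of the same cost (objective: alternative).

-- s.split(sep) for a nonempty sep (exact: PySem's sep ≠ "" split, lifted to String)
def strSplitOn (s sep : String) : List String :=
  (PySem.Chars.splitOn s.toList sep.toList).map String.ofList

-- ===== PORT A =====
def parse_selected_paths (raw_values : Option (List String)) : Option (List String) :=
  match raw_values with
  | none => none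
  | some rvs =>
    if rvs.isEmpty then none
    else
      let selected_paths : List String := rvs.foldl (fun acc raw_value =>
        if PySem.Str.strip raw_value = "" then acc
        else (strSplitOn raw_value ",").foldl (fun acc part =>
          let value := PySem.Str.strip part
          if value ≠ "" then acc ++ [value] else acc) acc) []
      if selected_paths.isEmpty then none else some selected_paths

-- ===== PORT B =====
-- one step of Source B's inner character loop; state = (tok, pend, out)
def scanStep (st : List Char × List Char × List String) (ch : Char) :
    List Char × List Char × List String :=
  let (tok, pend, out) := st
  if ch = ',' then
    ([], [], if tok ≠ [] then out ++ [String.ofList tok] else out)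
  else if PySem.Chars.isspace ch then
    (tok, if tok ≠ [] then pend ++ [ch] else pend, out)
  else
    (tok ++ pend ++ [ch], [], out)

-- Source B's per-raw-string pass: scan the characters, then flush the last token
def scanRaw (out : List String) (raw : String) : List String :=
  let st := raw.toList.foldl scanStep ([], [], out)
  if st.1 ≠ [] then st.2.2 ++ [String.ofList st.1] else st.2.2

def parse_selected_paths_alt (raw_values : Option (List String)) : Option (List String) :=
  match raw_values with
  | none => none
  | some rvs =>
    if rvs.isEmpty then none
    else
      let out := rvs.foldl scanRaw []
      if out.isEmpty then none else some out

-- ===== PRECONDITION & SPEC =====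
def Spec_parse_selected_paths (raw_values : Option (List String)) (out : Option (List String)) : Prop := out = parse_selected_paths_alt raw_values
instance (raw_values : Option (List String)) (out : Option (List String)) : Decidable (Spec_parse_selected_paths raw_values out) := by unfold Spec_parse_selected_paths; infer_instance

-- ===== CLAIM (what is proved, stated in full; the proofs are below) =====
def Claim_equal_parse_selected_paths : Prop := ∀ (raw_values : Option (List String)), Dom_parse_selected_paths raw_values → Spec_parse_selected_paths raw_values (parse_selected_paths raw_values)

-- ===== LEMMAS AND PROOFS =====

-- per-string contribution, at the character level
def contribC (l : List Char) : List (List Char) :=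
  ((l.splitOnP (· == ',')).map PySem.Chars.strip).filter (· ≠ [])

-- PySem's fuel-based splitOn with a one-character separator is Mathlib's splitOnP
theorem splitOn_go_single (c : Char) : ∀ (fuel : Nat) (l cur : List Char) (acc : List (List Char)),
    l.length < fuel →
    PySem.Chars.splitOn.go [c] fuel l cur acc
      = acc.reverse ++ (l.splitOnP (· == c)).modifyHead (cur.reverse ++ ·) := by
  intro fuel
  induction fuel with
  | zero => intro l cur acc h; omega
  | succ f ih =>
    intro l cur acc h
    match l with
    | [] => simp [PySem.Chars.splitOn.go, List.splitOnP_nil]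
    | x :: rest =>
      rw [PySem.Chars.splitOn.go.eq_def]
      simp only []
      by_cases hx : x = c
      · subst hx
        have hpre : List.isPrefixOf [x] (x :: rest) = true := by simp [List.isPrefixOf]
        rw [if_pos hpre]
        have hd : List.drop (List.length [x]) (x :: rest) = rest := rfl
        rw [hd, ih rest [] (cur.reverse :: acc) (by simpa using Nat.lt_of_succ_lt_succ h)]
        rw [List.splitOnP_cons, if_pos (by simp)]
        obtain ⟨h1, t1, he⟩ := List.exists_cons_of_ne_nil (List.splitOnP_ne_nil (· == x) rest)
        rw [he]
        simp only [List.modifyHead_cons, List.reverse_cons, List.reverse_nil, List.nil_append,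
          List.append_assoc, List.singleton_append, List.append_nil]
      · have hpre : List.isPrefixOf [c] (x :: rest) = false := by
          have hb : (c == x) = false := beq_eq_false_iff_ne.mpr (fun hcx => hx hcx.symm)
          simp [List.isPrefixOf, hb]
        rw [hpre]
        simp only [Bool.false_eq_true, if_false]
        rw [ih rest (x :: cur) acc (by simpa using Nat.lt_of_succ_lt_succ h)]
        rw [List.splitOnP_cons, if_neg (by simp [hx])]
        obtain ⟨h1, t1, he⟩ := List.exists_cons_of_ne_nil (List.splitOnP_ne_nil (· == c) rest)
        rw [he]
        simp only [List.modifyHead_cons, List.reverse_cons, List.append_assoc,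
          List.singleton_append]

theorem splitOn_single (c : Char) (l : List Char) :
    PySem.Chars.splitOn l [c] = l.splitOnP (· == c) := by
  rw [PySem.Chars.splitOn, splitOn_go_single c (l.length + 1) l [] [] (by omega)]
  obtain ⟨h1, t1, he⟩ := List.exists_cons_of_ne_nil (List.splitOnP_ne_nil (· == c) l)
  rw [he]; simp

-- empty strip means every character is whitespace
theorem strip_eq_nil (l : List Char) (h : PySem.Chars.strip l = []) :
    ∀ x ∈ l, PySem.Chars.isspace x = true := by
  have h2 : ∀ x ∈ PySem.Chars.lstrip l, PySem.Chars.isspace x = true := by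
    have := h
    unfold PySem.Chars.strip PySem.Chars.rstrip at this
    have hrev : List.dropWhile PySem.Chars.isspace (PySem.Chars.lstrip l).reverse = [] := by
      rcases List.eq_nil_or_concat (List.dropWhile PySem.Chars.isspace (PySem.Chars.lstrip l).reverse) with h0 | ⟨ys, y, hy⟩
      · exact h0
      · exfalso; rw [hy] at this; simp at this
    intro x hx
    exact List.dropWhile_eq_nil_iff.mp hrev x (by simpa using hx)
  intro x hx
  rcases List.mem_append.mp (by
      rw [List.takeWhile_append_dropWhile (p := PySem.Chars.isspace) (l := l)]; exact hx) with h1 | h1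
  · exact List.mem_takeWhile_imp h1
  · exact h2 x h1

-- the inner foldl of A appends the stripped non-empty parts
theorem inner_foldl (ps : List String) (acc : List String) :
    ps.foldl (fun acc part =>
        let value := PySem.Str.strip part
        if value ≠ "" then acc ++ [value] else acc) acc
      = acc ++ (ps.map PySem.Str.strip).filter (· ≠ "") := by
  induction ps generalizing acc with
  | nil => simp
  | cons p tl ih =>
    simp only [List.foldl_cons, List.map_cons, List.filter_cons]
    by_cases hv : PySem.Str.strip p ≠ ""
    · rw [if_pos hv, ih]; simp [hv]
    · rw [if_neg hv, ih]; simp at hv; simp [hv]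

-- the string-level per-raw contribution is contribC lifted through ofList
theorem map_filter_ofList (ps : List (List Char)) :
    ((ps.map String.ofList).map PySem.Str.strip).filter (· ≠ "")
      = ((ps.map PySem.Chars.strip).filter (· ≠ [])).map String.ofList := by
  simp only [List.map_map, List.filter_map]
  congr 1
  · funext x; simp [Function.comp, PySem.Str.strip]
  · apply List.filter_congr; intro x _
    simp [Function.comp, PySem.Str.strip, String.ofList_eq_empty_iff]

theorem contribS_eq (s : String) :
    ((strSplitOn s ",").map PySem.Str.strip).filter (· ≠ "")
      = (contribC s.toList).map String.ofList := by
  unfold strSplitOn contribC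
  rw [show ("," : String).toList = [','] from by decide, splitOn_single]
  exact map_filter_ofList _

-- a skipped (all-whitespace) raw string contributes nothing
theorem contribC_of_strip_nil (l : List Char) (h : PySem.Chars.strip l = []) :
    contribC l = [] := by
  unfold contribC
  rw [List.splitOnP_eq_single (· == ',') l (by
    intro x hx hc
    have := strip_eq_nil l h x hx
    rw [show x = ',' by simpa using hc] at this
    exact absurd this (by decide))]
  simp [h]

-- A's outer foldl flat-maps the per-raw contributions
theorem outer_foldl (rvs : List String) (acc : List String) :
    rvs.foldl (fun acc raw_value =>
        if PySem.Str.strip raw_value = "" then acc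
        else (strSplitOn raw_value ",").foldl (fun acc part =>
          let value := PySem.Str.strip part
          if value ≠ "" then acc ++ [value] else acc) acc) acc
      = acc ++ rvs.flatMap (fun s => (contribC s.toList).map String.ofList) := by
  induction rvs generalizing acc with
  | nil => simp
  | cons r tl ih =>
    simp only [List.foldl_cons, List.flatMap_cons]
    by_cases hr : PySem.Str.strip r = ""
    · rw [if_pos hr, ih]
      have : PySem.Chars.strip r.toList = [] := by
        have : (PySem.Str.strip r).toList = [] := by rw [hr]; decide
        simpa [PySem.Str.strip] using this
      rw [contribC_of_strip_nil r.toList this]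
      simp
    · rw [if_neg hr, inner_foldl, ih, contribS_eq, List.append_assoc]

-- ---- B-side characterisation ----

-- the final token the scanner's (tok, pend) state reaches on a comma-free tail
def gTok (tok pend : List Char) : List Char → List Char
  | [] => tok
  | c :: r =>
    if PySem.Chars.isspace c then gTok tok (if tok ≠ [] then pend ++ [c] else pend) r
    else gTok (tok ++ pend ++ [c]) [] r

-- the tokens the scanner emits from state (tok, pend) on the rest of the string
def emit (tok pend : List Char) : List Char → List (List Char)
  | [] => if tok ≠ [] then [tok] else []
  | c :: r =>
    if c = ',' then (if tok ≠ [] then [tok] else []) ++ emit [] [] r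
    else if PySem.Chars.isspace c then emit tok (if tok ≠ [] then pend ++ [c] else pend) r
    else emit (tok ++ pend ++ [c]) [] r

theorem rstrip_all_space (p : List Char) (hp : ∀ x ∈ p, PySem.Chars.isspace x = true) :
    PySem.Chars.rstrip p = [] := by
  unfold PySem.Chars.rstrip
  rw [List.dropWhile_eq_nil_iff.mpr (fun x hx => hp x (by simpa using hx))]
  rfl

theorem rstrip_append_cons (pend : List Char) (c : Char) (r : List Char)
    (hc : PySem.Chars.isspace c = false) :
    PySem.Chars.rstrip (pend ++ c :: r) = pend ++ c :: PySem.Chars.rstrip r := by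
  unfold PySem.Chars.rstrip
  rw [List.reverse_append, List.reverse_cons, List.append_assoc, List.dropWhile_append]
  by_cases h : (List.dropWhile PySem.Chars.isspace r.reverse).isEmpty
  · rw [if_pos h]
    rw [List.isEmpty_iff.mp h]
    simp [hc]
  · rw [if_neg h]
    simp

theorem gTok_of_ne (l : List Char) : ∀ (tok pend : List Char), tok ≠ [] →
    (∀ x ∈ pend, PySem.Chars.isspace x = true) →
    gTok tok pend l = tok ++ PySem.Chars.rstrip (pend ++ l) := by
  induction l with
  | nil =>
    intro tok pend htok hp
    simp [gTok, rstrip_all_space pend hp]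
  | cons c r ih =>
    intro tok pend htok hp
    rw [gTok]
    by_cases hc : PySem.Chars.isspace c = true
    · rw [if_pos hc, if_pos htok, ih tok (pend ++ [c]) htok (by
        intro x hx; rcases List.mem_append.mp hx with h | h
        · exact hp x h
        · simpa [List.mem_singleton.mp h] using hc)]
      simp
    · rw [if_neg hc, ih (tok ++ pend ++ [c]) [] (by simp) (by simp)]
      rw [rstrip_append_cons pend c r (by simpa using hc)]
      simp
theorem gTok_nil_nil (l : List Char) : gTok [] [] l = PySem.Chars.strip l := by
  induction l with
  | nil => rfl
  | cons c r ih =>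
    rw [gTok]
    by_cases hc : PySem.Chars.isspace c = true
    · rw [if_pos hc]
      simp only [ne_eq, not_true_eq_false, reduceIte, ih]
      unfold PySem.Chars.strip PySem.Chars.lstrip
      rw [List.dropWhile_cons_of_pos (by simpa using hc)]
    · rw [if_neg hc]
      simp only [List.nil_append]
      rw [gTok_of_ne r [c] [] (by simp) (by simp)]
      unfold PySem.Chars.strip PySem.Chars.lstrip
      rw [List.dropWhile_cons_of_neg (by simpa using hc)]
      rw [show ([c] : List Char) ++ PySem.Chars.rstrip ([] ++ r)
            = PySem.Chars.rstrip ([] ++ c :: r) from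
          (by simpa using (rstrip_append_cons [] c r (by simpa using hc)).symm)]
      simp

-- the scanner from state (tok, pend) produces gTok of the first comma-segment,
-- then the stripped non-empty later segments
theorem emit_eq (l : List Char) : ∀ (tok pend : List Char),
    emit tok pend l
      = (if gTok tok pend ((l.splitOnP (· == ',')).headI) ≠ []
          then [gTok tok pend ((l.splitOnP (· == ',')).headI)] else [])
        ++ (((l.splitOnP (· == ',')).tail).map PySem.Chars.strip).filter (· ≠ []) := by
  induction l with
  | nil => intro tok pend; simp [emit, gTok, List.splitOnP_nil]
  | cons c r ih =>
    intro tok pend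
    obtain ⟨h1, t1, he⟩ := List.exists_cons_of_ne_nil (List.splitOnP_ne_nil (· == ',') r)
    by_cases hc : c = ','
    · subst hc
      have hsplit : List.splitOnP (· == ',') (',' :: r) = [] :: h1 :: t1 := by
        rw [List.splitOnP_cons, if_pos (by simp), he]
      rw [hsplit, emit, if_pos rfl, ih [] [], he]
      simp only [List.headI_cons, List.tail_cons, gTok_nil_nil, List.map_cons, List.filter_cons]
      have hg : gTok tok pend [] = tok := rfl
      rw [hg]
      by_cases hs : PySem.Chars.strip h1 = [] <;> simp [hs]
    · have hsplit : List.splitOnP (· == ',') (c :: r) = (c :: h1) :: t1 := by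
        rw [List.splitOnP_cons, if_neg (by simp [hc]), he, List.modifyHead_cons]
      rw [hsplit, emit, if_neg hc]
      simp only [List.headI_cons, List.tail_cons]
      by_cases hsp : PySem.Chars.isspace c = true
      · rw [if_pos hsp, ih, he]
        simp only [List.headI_cons, List.tail_cons]
        have hstep : gTok tok pend (c :: h1)
            = gTok tok (if tok ≠ [] then pend ++ [c] else pend) h1 := by
          rw [gTok, if_pos hsp]
        rw [hstep]
      · rw [if_neg hsp, ih, he]
        simp only [List.headI_cons, List.tail_cons]
        have hstep : gTok tok pend (c :: h1) = gTok (tok ++ pend ++ [c]) [] h1 := by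
          rw [gTok, if_neg hsp]
        rw [hstep]

theorem emit_eq_contribC (l : List Char) : emit [] [] l = contribC l := by
  rw [emit_eq l [] []]
  obtain ⟨h1, t1, he⟩ := List.exists_cons_of_ne_nil (List.splitOnP_ne_nil (· == ',') l)
  unfold contribC
  rw [he]
  simp only [List.headI, List.tail, List.map_cons, List.filter_cons, gTok_nil_nil]
  by_cases hs : PySem.Chars.strip h1 ≠ [] <;> simp [hs]

-- the character fold of B's port, flushed, equals 'out ++ emitted tokens'
theorem scan_foldl_emit (l : List Char) : ∀ (tok pend : List Char) (out : List String),
    (fun st : List Char × List Char × List String =>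
        if st.1 ≠ [] then st.2.2 ++ [String.ofList st.1] else st.2.2)
      (l.foldl scanStep (tok, pend, out))
      = out ++ (emit tok pend l).map String.ofList := by
  induction l with
  | nil =>
    intro tok pend out
    by_cases h : tok ≠ [] <;> simp [emit, h]
  | cons c r ih =>
    intro tok pend out
    rw [List.foldl_cons, emit]
    by_cases hc : c = ','
    · subst hc
      by_cases h : tok ≠ []
      · simp only [scanStep, if_pos h, ih]
        simp
      · simp only [scanStep, if_neg h, ih]
        simp
    · by_cases hsp : PySem.Chars.isspace c = true
      · simp only [scanStep, if_neg hc, if_pos hsp, ih]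
      · simp only [scanStep, if_neg hc, if_neg hsp, ih]

theorem scanRaw_eq (out : List String) (raw : String) :
    scanRaw out raw = out ++ (contribC raw.toList).map String.ofList := by
  unfold scanRaw
  rw [← emit_eq_contribC]
  exact scan_foldl_emit raw.toList [] [] out

-- B's outer foldl flat-maps the same per-raw contributions
theorem b_outer_foldl (rvs : List String) (out : List String) :
    rvs.foldl scanRaw out = out ++ rvs.flatMap (fun s => (contribC s.toList).map String.ofList) := by
  induction rvs generalizing out with
  | nil => simp
  | cons r tl ih =>
    rw [List.foldl_cons, scanRaw_eq, ih, List.flatMap_cons, List.append_assoc]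

-- ===== VERDICT (by name: the statement is the Claim_ definition above) =====
theorem parse_selected_paths_spec : Claim_equal_parse_selected_paths := by
  intro raw_values _
  unfold Spec_parse_selected_paths parse_selected_paths parse_selected_paths_alt
  match raw_values with
  | none => rfl
  | some rvs =>
    by_cases h : rvs.isEmpty
    · simp [h]
    · simp only [h, Bool.false_eq_true, if_false]
      rw [outer_foldl rvs [], b_outer_foldl rvs []]
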